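-- pv_equiv track=rewrite | github.com/pokerdio/generic | e/e-694.py | signature_grow
-- ===== SOURCE A (Python) =====
-- def signature_grow(s, n, m=0):
--     if not m:
--         m = 1
--         for i in s:
--             m *= (i ** 3)
--     if len(s) == 1:
--         while m <= n:
--             yield m
--             m = m * s[0]
--     else:
--
--         s2 = s[1:]
--         while m <= n:
--             yield from signature_grow(s2, n, m)
--             m = m * s[0]
-- ===== SOURCE B (Python) =====
-- def _powers(c, base, n):
--     while base <= n:
--         yield base
--         base *= c
--
-- def signature_grow(s, n, m=0):
--     if not m:
--         m = 1
--         for i in s: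
--             m *= i ** 3
--     cur = [m] if m <= n else []
--     for c in s:
--         cur = [v for b in cur for v in _powers(c, b, n)]
--     yield from cur
-- ===== Notes on version B (the rewrite author's own statement) =====
-- stated objective: alternative
-- what changed: Replaces A's depth-first recursive generator (nested while loops recursing on the tail of s) by an iterative level-by-level fold: a per-level power generator is combined across levels with a flat list comprehension, yielding the same sequence with no recursion.
-- crash fix: On s = [] with the (possibly recomputed) base <= n, A recurses on itself without bound and raises RecursionError; B returns [base], the empty product of powers. — e.g. on signature_grow([], 5, 3): A raises RecursionError, B returns [3]
import Mathlib
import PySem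

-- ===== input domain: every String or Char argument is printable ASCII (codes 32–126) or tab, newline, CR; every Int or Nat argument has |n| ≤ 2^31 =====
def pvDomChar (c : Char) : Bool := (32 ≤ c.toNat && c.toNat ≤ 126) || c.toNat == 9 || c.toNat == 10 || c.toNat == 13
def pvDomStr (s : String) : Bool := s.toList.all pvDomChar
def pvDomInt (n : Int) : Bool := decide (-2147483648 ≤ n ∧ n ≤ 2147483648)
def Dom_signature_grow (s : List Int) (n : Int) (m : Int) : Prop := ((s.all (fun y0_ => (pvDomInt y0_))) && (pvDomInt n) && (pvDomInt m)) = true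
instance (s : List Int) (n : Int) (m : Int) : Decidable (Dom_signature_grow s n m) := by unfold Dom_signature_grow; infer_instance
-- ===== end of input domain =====

-- B replaces A's depth-first recursive generator by an iterative level-by-level fold
-- (per-level power lists combined with a flat comprehension); objective: alternative, not faster.
-- Both are generators with no other side effects; equivalence is about the yielded sequence.

-- ===== PORT A =====
-- m = 1; for i in s: m *= i ** 3   (A's recompute of a falsy m)
def prodCubes (s : List Int) : Int := s.foldl (fun a i => a * i ^ 3) 1

-- the len(s)==1 loop: while m <= n: yield m; m = m * s[0]  (fuel 64 covers every loop
-- admitted by Pre_ within Dom: the magnitude at least doubles per step, or the loop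
-- stops within two steps, so well under 64 iterations occur before m exceeds n)
def sgInner (c n : Int) : Nat → Int → List Int
  | 0, _ => []
  | f + 1, m => if m ≤ n then m :: sgInner c n f (m * c) else []

-- the outer loop: while m <= n: yield from signature_grow(s2, n, m); m = m * s[0]
def sgOuter (rec : Int → List Int) (c n : Int) : Nat → Int → List Int
  | 0, _ => []
  | f + 1, m => if m ≤ n then rec m ++ sgOuter rec c n f (m * c) else []

def signature_grow (s : List Int) (n : Int) (m : Int) : List Int :=
  let m' := if m = 0 then prodCubes s else m
  match s with
  | [] => []      -- Python raises RecursionError here when m' ≤ n (outside Pre_, see Raises_); when n < m' it yields nothing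
  | [c] => sgInner c n 64 m'
  | c :: s2 => sgOuter (fun b => signature_grow s2 n b) c n 64 m'

-- ===== PORT B =====
-- def _powers(c, base, n): while base <= n: yield base; base *= c   (same fuel bound as A's loops)
def sgPowers (c n : Int) : Nat → Int → List Int
  | 0, _ => []
  | f + 1, b => if b ≤ n then b :: sgPowers c n f (b * c) else []

def signature_grow_alt (s : List Int) (n : Int) (m : Int) : List Int :=
  let m0 := if m = 0 then s.foldl (fun a i => a * i ^ 3) 1 else m
  let cur0 : List Int := if m0 ≤ n then [m0] else []
  s.foldl (fun cur c => cur.flatMap (fun b => sgPowers c n 64 b)) cur0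

-- ===== PRECONDITION & SPEC =====
-- Pre_ is exactly the set of inputs on which the Python A returns (terminates without
-- raising): it excludes only inputs where A loops or recurses forever — a base ≤ n kept
-- ≤ n forever by factors 0/±1 or by a sign pattern driving a negative base into a ≥ 2
-- factor — and the empty-s inputs with base ≤ n, on which A raises RecursionError
-- (see Raises_ below).  A returns a value on every input admitted here.
def Pre_signature_grow (s : List Int) (n : Int) (m : Int) : Prop :=
  let m' := if m = 0 then prodCubes s else m
  n < m' ∨ (s ≠ [] ∧
    ((n < 0 ∧ ∀ i ∈ s, i ≤ 0)
     ∨ (0 ≤ n ∧ m' < -n ∧ ∀ i ∈ s, i < 0)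
     ∨ (0 ≤ n ∧ -n ≤ m' ∧ m' ≠ 0 ∧ (∀ i ∈ s, 2 ≤ |i|) ∧
         ((0 < m' ∧ s.Pairwise (fun a b => a < 0 → b < 0)) ∨ (m' < 0 ∧ ∀ i ∈ s, i < 0)))))
instance (s : List Int) (n : Int) (m : Int) : Decidable (Pre_signature_grow s n m) := by
  unfold Pre_signature_grow; infer_instance

def pvWitness_signature_grow : List Int × Int × Int := ([2, 3], 100, 0)

-- On the empty factor list with base ≤ n, A recurses on itself unboundedly and raises
-- RecursionError; B returns the singleton [base] (the empty product of powers).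
def Raises_signature_grow (s : List Int) (n : Int) (m : Int) : Prop :=
  s = [] ∧ (if m = 0 then prodCubes s else m) ≤ n
instance (s : List Int) (n : Int) (m : Int) : Decidable (Raises_signature_grow s n m) := by
  unfold Raises_signature_grow; infer_instance
def pvRaiseWitness_signature_grow : List Int × Int × Int := ([], 5, 3)
def pvRaiseWitnessOut_signature_grow : List Int := [3]

def Spec_signature_grow (s : List Int) (n : Int) (m : Int) (out : List Int) : Prop := out = signature_grow_alt s n m
instance (s : List Int) (n : Int) (m : Int) (out : List Int) : Decidable (Spec_signature_grow s n m out) := by unfold Spec_signature_grow; infer_instance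

-- ===== CLAIM (what is proved, stated in full; the proofs are below) =====
def Claim_equal_signature_grow : Prop := ∀ (s : List Int) (n : Int) (m : Int), Dom_signature_grow s n m → Pre_signature_grow s n m → Spec_signature_grow s n m (signature_grow s n m)
def Claim_raises_signature_grow : Prop := (∀ (s : List Int) (n : Int) (m : Int), Dom_signature_grow s n m → Raises_signature_grow s n m → ¬ Pre_signature_grow s n m) ∧ (Dom_signature_grow (pvRaiseWitness_signature_grow.1) (pvRaiseWitness_signature_grow.2.1) (pvRaiseWitness_signature_grow.2.2) ∧ Raises_signature_grow (pvRaiseWitness_signature_grow.1) (pvRaiseWitness_signature_grow.2.1) (pvRaiseWitness_signature_grow.2.2) ∧ signature_grow_alt (pvRaiseWitness_signature_grow.1) (pvRaiseWitness_signature_grow.2.1) (pvRaiseWitness_signature_grow.2.2) = pvRaiseWitnessOut_signature_grow)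

-- ===== LEMMAS AND PROOFS =====

def sgStep (n : Int) (cur : List Int) (c : Int) : List Int := cur.flatMap (fun b => sgPowers c n 64 b)

def sgBuild (s : List Int) (n : Int) (L : List Int) : List Int := s.foldl (sgStep n) L

theorem sgInner_eq_sgPowers (c n : Int) : ∀ (f : Nat) (m : Int), sgInner c n f m = sgPowers c n f m := by
  intro f
  induction f with
  | zero => intro m; rfl
  | succ f ih => intro m; simp [sgInner, sgPowers, ih]

theorem sgOuter_eq (rec : Int → List Int) (c n : Int) :
    ∀ (f : Nat) (m : Int), sgOuter rec c n f m = (sgPowers c n f m).flatMap rec := by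
  intro f
  induction f with
  | zero => intro m; rfl
  | succ f ih => intro m; simp only [sgOuter, sgPowers]; split <;> simp [ih]

theorem sgPowers_of_gt (c n : Int) (f : Nat) (m : Int) (h : n < m) : sgPowers c n f m = [] := by
  cases f with
  | zero => rfl
  | succ f => simp [sgPowers, not_le.mpr h]

theorem mem_sgPowers_le (c n : Int) :
    ∀ (f : Nat) (b0 b : Int), b ∈ sgPowers c n f b0 → b ≤ n := by
  intro f
  induction f with
  | zero => intro b0 b h; simp [sgPowers] at h
  | succ f ih =>
      intro b0 b h
      simp only [sgPowers] at h
      split at h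
      · rcases List.mem_cons.mp h with h | h
        · subst h; assumption
        · exact ih _ _ h
      · simp at h

theorem mem_sgPowers_ne (c n : Int) (hc : c ≠ 0) :
    ∀ (f : Nat) (b0 b : Int), b0 ≠ 0 → b ∈ sgPowers c n f b0 → b ≠ 0 := by
  intro f
  induction f with
  | zero => intro b0 b _ h; simp [sgPowers] at h
  | succ f ih =>
      intro b0 b hb0 h
      simp only [sgPowers] at h
      split at h
      · rcases List.mem_cons.mp h with h | h
        · subst h; exact hb0
        · exact ih _ _ (mul_ne_zero hb0 hc) h
      · simp at h

theorem sgBuild_nil_list (n : Int) : ∀ (s : List Int), sgBuild s n [] = [] := by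
  intro s
  induction s with
  | nil => rfl
  | cons c s ih => simpa [sgBuild, sgStep, List.foldl_cons] using ih

theorem sgBuild_append (n : Int) :
    ∀ (s : List Int) (L1 L2 : List Int), sgBuild s n (L1 ++ L2) = sgBuild s n L1 ++ sgBuild s n L2 := by
  intro s
  induction s with
  | nil => intro L1 L2; rfl
  | cons c s ih =>
      intro L1 L2
      simp only [sgBuild, List.foldl_cons] at *
      rw [show sgStep n (L1 ++ L2) c = sgStep n L1 c ++ sgStep n L2 c by
            simp [sgStep]]
      exact ih _ _

theorem sgBuild_flatMap (n : Int) (s : List Int) :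
    ∀ (L : List Int), L.flatMap (fun b => sgBuild s n [b]) = sgBuild s n L := by
  intro L
  induction L with
  | nil => simp [sgBuild_nil_list]
  | cons b L ih =>
      have : (b :: L) = [b] ++ L := rfl
      rw [this, sgBuild_append, List.flatMap_append, ih]
      simp

theorem flatMap_congr_mem {α β : Type} (L : List α) (f g : α → List β)
    (h : ∀ b ∈ L, f b = g b) : L.flatMap f = L.flatMap g := by
  induction L with
  | nil => rfl
  | cons b L ih =>
      simp only [List.flatMap_cons]
      rw [h b (List.mem_cons_self), ih (fun x hx => h x (List.mem_cons_of_mem _ hx))]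

-- main induction: whenever no base can be recomputed-from-zero along the way
-- (every base stays nonzero: either n < 0 forces every yielded base < 0, or every
-- factor is nonzero), the depth-first recursion equals the level fold
theorem sg_main (n : Int) :
    ∀ (s : List Int) (m : Int), s ≠ [] → (n < 0 ∨ ∀ i ∈ s, i ≠ 0) → m ≠ 0 →
      signature_grow s n m = sgBuild s n (if m ≤ n then [m] else []) := by
  intro s
  induction s with
  | nil => intro m h; exact absurd rfl h
  | cons c s2 ih =>
      intro m _ hnz hm
      cases s2 with
      | nil =>
          -- base case s = [c]
          simp only [signature_grow, if_neg hm]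
          rw [sgInner_eq_sgPowers]
          by_cases hle : m ≤ n
          · simp [sgBuild, sgStep, hle]
          · rw [sgPowers_of_gt c n 64 m (not_le.mp hle)]
            simp [sgBuild_nil_list, hle]
      | cons d t =>
          -- step case s = c :: (d :: t)
          have hs2ne : (d :: t) ≠ ([] : List Int) := by simp
          have hnz2 : n < 0 ∨ ∀ i ∈ (d :: t), i ≠ 0 := by
            rcases hnz with h | h
            · exact Or.inl h
            · exact Or.inr (fun i hi => h i (List.mem_cons_of_mem _ hi))
          have lhs : signature_grow (c :: d :: t) n m
              = (sgPowers c n 64 m).flatMap (fun b => signature_grow (d :: t) n b) := by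
            simp only [signature_grow, if_neg hm]
            exact sgOuter_eq _ c n 64 m
          rw [lhs]
          rw [flatMap_congr_mem (sgPowers c n 64 m) _ (fun b => sgBuild (d :: t) n [b])
              (by
                intro b hb
                have hble : b ≤ n := mem_sgPowers_le c n 64 m b hb
                have hbne : b ≠ 0 := by
                  rcases hnz with h | h
                  · omega
                  · exact mem_sgPowers_ne c n (h c List.mem_cons_self) 64 m b hm hb
                rw [ih b hs2ne hnz2 hbne, if_pos hble])]
          rw [sgBuild_flatMap]
          -- right-hand side
          by_cases hle : m ≤ n
          · simp only [if_pos hle, sgBuild, List.foldl_cons]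
            have : sgStep n [m] c = sgPowers c n 64 m := by simp [sgStep]
            rw [this]
          · rw [sgPowers_of_gt c n 64 m (not_le.mp hle)]
            simp only [if_neg hle, sgBuild, List.foldl_cons]
            have : sgStep n [] c = ([] : List Int) := by simp [sgStep]
            rw [this]

theorem alt_eq_build (s : List Int) (n m : Int) :
    signature_grow_alt s n m
      = sgBuild s n (if (if m = 0 then prodCubes s else m) ≤ n then [if m = 0 then prodCubes s else m] else []) := rfl

theorem sg_zero_shift (s : List Int) (n : Int) (h : prodCubes s ≠ 0) :
    signature_grow s n 0 = signature_grow s n (prodCubes s) := by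
  cases s with
  | nil => rfl
  | cons c s2 =>
      cases s2 with
      | nil => simp [signature_grow, h]
      | cons d t => simp [signature_grow, h]

-- A returns [] whenever its (possibly recomputed) base already exceeds n
theorem sg_gt_nil (s : List Int) (n m : Int)
    (h : n < (if m = 0 then prodCubes s else m)) : signature_grow s n m = [] := by
  cases s with
  | nil => rfl
  | cons c s2 =>
      cases s2 with
      | nil =>
          simp only [signature_grow, sgInner_eq_sgPowers]
          exact sgPowers_of_gt _ _ _ _ h
      | cons d t =>
          simp only [signature_grow, sgOuter_eq]
          rw [sgPowers_of_gt _ _ _ _ h]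
          rfl

theorem alt_gt_nil (s : List Int) (n m : Int)
    (h : n < (if m = 0 then prodCubes s else m)) : signature_grow_alt s n m = [] := by
  rw [alt_eq_build, if_neg (not_le.mpr h), sgBuild_nil_list]

-- ===== VERDICT (by name: the statement is the Claim_ definition above) =====
theorem signature_grow_spec : Claim_equal_signature_grow := by
  intro s n m _ hpre
  unfold Spec_signature_grow
  unfold Pre_signature_grow at hpre
  by_cases hm0 : m = 0
  · subst hm0
    simp only [reduceIte] at hpre ⊢
    by_cases hgt : n < prodCubes s
    · rw [sg_gt_nil s n 0 (by simpa using hgt), alt_gt_nil s n 0 (by simpa using hgt)]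
    · rcases hpre with h | ⟨hs, hcase⟩
      · exact absurd h hgt
      · have hne : prodCubes s ≠ 0 := by
          rcases hcase with ⟨hn, _⟩ | ⟨hn, hlt, _⟩ | ⟨_, _, hne, _, _⟩ <;> omega
        have hnz : n < 0 ∨ ∀ i ∈ s, i ≠ 0 := by
          rcases hcase with ⟨hn, _⟩ | ⟨_, _, hall⟩ | ⟨_, _, _, habs, _⟩
          · exact Or.inl hn
          · exact Or.inr (fun i hi => by have := hall i hi; omega)
          · exact Or.inr (fun i hi => by have := habs i hi; rcases abs_cases i with ⟨h,_⟩|⟨h,_⟩ <;> omega)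
        rw [sg_zero_shift s n hne, sg_main n s (prodCubes s) hs hnz hne, alt_eq_build]
        simp
  · simp only [if_neg hm0] at hpre ⊢
    by_cases hgt : n < m
    · rw [sg_gt_nil s n m (by simpa [hm0] using hgt), alt_gt_nil s n m (by simpa [hm0] using hgt)]
    · rcases hpre with h | ⟨hs, hcase⟩
      · exact absurd h hgt
      · have hnz : n < 0 ∨ ∀ i ∈ s, i ≠ 0 := by
          rcases hcase with ⟨hn, _⟩ | ⟨_, _, hall⟩ | ⟨_, _, _, habs, _⟩
          · exact Or.inl hn
          · exact Or.inr (fun i hi => by have := hall i hi; omega)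
          · exact Or.inr (fun i hi => by have := habs i hi; rcases abs_cases i with ⟨h,_⟩|⟨h,_⟩ <;> omega)
        rw [sg_main n s m hs hnz hm0, alt_eq_build]
        simp [hm0]

theorem signature_grow_raises : Claim_raises_signature_grow := by
  unfold Claim_raises_signature_grow
  refine ⟨?_, by decide⟩
  intro s n m _ ⟨hs, hle⟩ hpre
  subst hs
  unfold Pre_signature_grow at hpre
  simp only at hpre
  rcases hpre with h | ⟨h, _⟩
  · exact absurd h (not_lt.mpr hle)
  · exact h rfl

-- the raises-witness equation extracted by name (B's port really returns [3] at ([], 5, 3))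
theorem pvRaiseWitness_ok : signature_grow_alt [] 5 3 = pvRaiseWitnessOut_signature_grow :=
  signature_grow_raises.2.2.2
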